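-- pv_equiv track=rewrite | github.com/chncyhn/advent-of-code-2018 | day_05.py | part_1
-- ===== SOURCE A (Python) =====
-- def part_1(polymer):
--     stack = []
--     for p in polymer:
--         if stack and abs(ord(p) - ord(stack[-1])) == 32:
--             stack.pop()
--         else:
--             stack.append(p)
--     return len(stack)
-- ===== SOURCE B (Python) =====
-- def part_1(polymer):
--     seq = list(polymer)
--     i = 0
--     while i + 1 < len(seq):
--         if abs(ord(seq[i]) - ord(seq[i + 1])) == 32:
--             del seq[i:i + 2]
--             if i > 0:
--                 i -= 1
--         else:
--             i += 1
--     return len(seq)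
-- ===== Notes on version B (the rewrite author's own statement) =====
-- stated objective: alternative
-- what changed: B removes reacting pairs in the sequence itself with a cursor that backtracks one position after each deletion, instead of A's auxiliary stack of kept characters.
import Mathlib
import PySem

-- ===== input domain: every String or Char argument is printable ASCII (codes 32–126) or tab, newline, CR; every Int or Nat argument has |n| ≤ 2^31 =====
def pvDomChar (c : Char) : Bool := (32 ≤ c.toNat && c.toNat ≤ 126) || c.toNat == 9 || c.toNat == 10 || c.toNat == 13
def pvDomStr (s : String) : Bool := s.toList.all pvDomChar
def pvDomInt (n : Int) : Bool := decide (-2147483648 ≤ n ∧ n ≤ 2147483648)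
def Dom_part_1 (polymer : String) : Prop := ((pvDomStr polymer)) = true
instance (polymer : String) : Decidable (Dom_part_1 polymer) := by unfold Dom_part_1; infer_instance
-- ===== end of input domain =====

-- B replaces A's auxiliary stack by deleting reacting pairs in the sequence itself with a
-- backtracking cursor (objective: alternative decomposition, same result, no speed claim).

-- ===== PORT A =====
-- one step of A's loop body: stack[-1] lookup, pop on reaction, append otherwise
def stepA (stack : List Char) (p : Char) : List Char :=
  match stack.getLast? with
  | some t => if ((p.toNat : Int) - (t.toNat : Int)).natAbs = 32 then stack.dropLast else stack ++ [p]
  | none => stack ++ [p]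

def part_1 (polymer : String) : Int :=
  ((polymer.toList.foldl stepA ([] : List Char)).length : Int)

-- ===== PORT B =====
-- zipper port of B's while-loop: ls = seq[:i] reversed, rs = seq[i:]; 'del seq[i:i+2]' then
-- 'i -= 1' moves the previous kept char back onto the front of rs
def goB (ls rs : List Char) : List Char :=
  match rs with
  | a :: b :: rest =>
    if ((a.toNat : Int) - (b.toNat : Int)).natAbs = 32 then
      match ls with
      | c :: ls' => goB ls' (c :: rest)
      | [] => goB [] rest
    else goB (a :: ls) (b :: rest)
  | _ => ls.reverse ++ rs
termination_by 2 * rs.length + ls.length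
decreasing_by all_goals simp <;> omega

def part_1_alt (polymer : String) : Int :=
  ((goB [] polymer.toList).length : Int)

-- ===== PRECONDITION & SPEC =====
def Spec_part_1 (polymer : String) (out : Int) : Prop := out = part_1_alt polymer
instance (polymer : String) (out : Int) : Decidable (Spec_part_1 polymer out) := by unfold Spec_part_1; infer_instance

-- ===== CLAIM (what is proved, stated in full; the proofs are below) =====
def Claim_equal_part_1 : Prop := ∀ (polymer : String), Dom_part_1 polymer → Spec_part_1 polymer (part_1 polymer)

-- ===== LEMMAS AND PROOFS =====

-- head-top stack formulation of A's process, used as the common reference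
def stepS (stack : List Char) (p : Char) : List Char :=
  match stack with
  | t :: s' => if ((p.toNat : Int) - (t.toNat : Int)).natAbs = 32 then s' else p :: t :: s'
  | [] => [p]

theorem stepA_eq_rev (s : List Char) (p : Char) :
    stepA s p = (stepS s.reverse p).reverse := by
  rcases s.eq_nil_or_concat with rfl | ⟨ys, t, rfl⟩
  · simp [stepA, stepS]
  · simp only [stepA, stepS, List.concat_eq_append, List.getLast?_append,
      List.getLast?_singleton, List.reverse_append, List.reverse_cons,
      List.reverse_nil, List.nil_append, List.cons_append, List.dropLast_concat]
    split_ifs <;> simp_all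

theorem foldl_stepA_eq (xs : List Char) : ∀ s : List Char,
    xs.foldl stepA s = (xs.foldl stepS s.reverse).reverse := by
  induction xs with
  | nil => intro s; simp
  | cons x xs ih =>
    intro s
    rw [List.foldl_cons, List.foldl_cons, stepA_eq_rev, ih, List.reverse_reverse]

-- invariant: adjacent chars (head-top stack order) never react
def NoReact : List Char → Prop
  | a :: b :: l => ((a.toNat : Int) - (b.toNat : Int)).natAbs ≠ 32 ∧ NoReact (b :: l)
  | _ => True

theorem stepS_push (ls : List Char) (a : Char) (h : NoReact (a :: ls)) :
    stepS ls a = a :: ls := by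
  rcases ls with _ | ⟨t, ls'⟩
  · simp [stepS]
  · rcases h with ⟨h1, _⟩
    simp [stepS, h1]

theorem goB_eq_fold : ∀ n ls a rs, 2 * rs.length + ls.length < n → NoReact (a :: ls) →
    goB ls (a :: rs) = ((a :: rs).foldl stepS ls).reverse := by
  intro n
  induction n with
  | zero => intro ls a rs h; omega
  | succ n ih =>
    intro ls a rs hn hinv
    match rs with
    | [] =>
      rw [List.foldl_cons, List.foldl_nil, stepS_push ls a hinv]
      simp [goB]
    | b :: rest =>
      by_cases hr : ((a.toNat : Int) - (b.toNat : Int)).natAbs = 32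
      · -- reacting pair: B deletes (a,b); stack run pushes a then pops it on b
        have hba : ((b.toNat : Int) - (a.toNat : Int)).natAbs = 32 := by omega
        have hfold : ((a :: b :: rest).foldl stepS ls) = rest.foldl stepS ls := by
          rw [List.foldl_cons, stepS_push ls a hinv, List.foldl_cons]
          simp [stepS, hba]
        rw [hfold]
        rcases ls with _ | ⟨c, ls'⟩
        · -- i = 0: cursor stays, continue on rest
          have hstep : goB [] (a :: b :: rest) = goB [] rest := by
            rw [goB.eq_def]; simp [hr]
          rw [hstep]
          rcases rest with _ | ⟨x, xs⟩
          · simp [goB]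
          · have hx : NoReact [x] := by simp [NoReact]
            exact ih [] x xs (by simp at hn ⊢; omega) hx
        · -- i > 0: step back, the previous kept char c returns to the front
          have hstep : goB (c :: ls') (a :: b :: rest) = goB ls' (c :: rest) := by
            rw [goB.eq_def]; simp [hr]
          have hinv' : NoReact (c :: ls') := hinv.2
          rw [hstep, ih ls' c rest (by simp at hn ⊢; omega) hinv',
            List.foldl_cons, stepS_push ls' c hinv']
      · -- no reaction: advance the cursor / push a
        have hba : ((b.toNat : Int) - (a.toNat : Int)).natAbs ≠ 32 := by omega
        have hstep : goB ls (a :: b :: rest) = goB (a :: ls) (b :: rest) := by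
          rw [goB.eq_def]; simp [hr]
        have hinv' : NoReact (b :: a :: ls) := ⟨hba, hinv⟩
        rw [hstep, ih (a :: ls) b rest (by simp at hn ⊢; omega) hinv',
          List.foldl_cons, List.foldl_cons, List.foldl_cons, stepS_push ls a hinv]

theorem goB_nil_eq (xs : List Char) : goB [] xs = (xs.foldl stepS []).reverse := by
  rcases xs with _ | ⟨x, rest⟩
  · simp [goB]
  · exact goB_eq_fold (2 * rest.length + 2) [] x rest (by simp) trivial

-- ===== VERDICT (by name: the statement is the Claim_ definition above) =====
theorem part_1_spec : Claim_equal_part_1 := by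
  intro polymer _
  unfold Spec_part_1 part_1 part_1_alt
  rw [foldl_stepA_eq, goB_nil_eq]
  simp
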